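-- pv_equiv track=rewrite | github.com/stathisp18056/-1- | ergasia13.py | maxDistanse
-- ===== SOURCE A (Python) =====
-- def maxDistanse(a,maximum):
-- 	maxsum=0
-- 	for i in range(0,len(a)):
-- 		s=0
-- 		for j in range(i,len(a)):
-- 			if s+a[j]<=maximum:
-- 				s+=a[j]
-- 			else:
-- 				break
-- 			if s>maxsum:
-- 				maxsum=s
-- 	return maxsum
-- ===== SOURCE B (Python) =====
-- def maxDistanse(a, maximum):
--     # Monotonic-stack + binary-search reformulation over prefix sums, O(n log n).
--     # Scan starts i from right to left, maintaining the strictly decreasing list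
--     # of running-maximum prefix sums of the suffix a[i+1:]; the best capped run
--     # from i is the largest such running maximum not exceeding P(i)+maximum.
--     n = len(a)
--     st = []          # suffix running maxima of prefix sums, decreasing; st[-1] smallest/nearest
--     best = 0
--     pi1 = sum(a)     # P(i+1): prefix sum of a[:i+1], maintained while i descends
--     for i in range(n - 1, -1, -1):
--         v = pi1
--         while st and st[-1] <= v:
--             st.pop()
--         st.append(v)
--         pi = pi1 - a[i]          # P(i)
--         thr = pi + maximum
--         lo, hi = 0, len(st)      # binary search: count of stack entries > thr
--         while lo < hi:
--             mid = (lo + hi) // 2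
--             if st[mid] > thr:
--                 lo = mid + 1
--             else:
--                 hi = mid
--         if lo < len(st) and st[lo] - pi > best:
--             best = st[lo] - pi
--         pi1 = pi
--     return best
-- ===== Notes on version B (the rewrite author's own statement) =====
-- stated objective: faster
-- what changed: B replaces A's restart-at-every-index nested scan by a single right-to-left pass over prefix sums that maintains a monotonic stack of suffix running maxima and binary-searches it per start index, O(n log n) instead of O(n^2).
import Mathlib
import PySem

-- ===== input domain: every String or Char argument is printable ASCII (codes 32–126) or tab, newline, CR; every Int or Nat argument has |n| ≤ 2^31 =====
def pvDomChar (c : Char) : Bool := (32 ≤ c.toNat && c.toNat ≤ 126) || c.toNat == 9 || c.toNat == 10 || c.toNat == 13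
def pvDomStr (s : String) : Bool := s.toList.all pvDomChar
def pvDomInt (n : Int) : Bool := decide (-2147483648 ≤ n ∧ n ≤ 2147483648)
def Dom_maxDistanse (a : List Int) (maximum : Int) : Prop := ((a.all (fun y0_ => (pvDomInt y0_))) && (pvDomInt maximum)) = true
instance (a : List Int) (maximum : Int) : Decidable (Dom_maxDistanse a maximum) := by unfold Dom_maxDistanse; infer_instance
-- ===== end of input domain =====

-- B rewrites A's per-start rescans as one right-to-left pass over prefix sums with a
-- monotonic stack of suffix running maxima queried by binary search (objective: faster).


-- tiny termination lemmas (cited by the recursive definitions below)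
theorem pvT_dropLast_lt (st : List Int) (h : st ≠ []) : st.dropLast.length < st.length := by
  rw [List.length_dropLast]
  exact Nat.sub_lt (List.length_pos_of_ne_nil h) Nat.one_pos

theorem pvT_mid_ge (lo hi : Nat) (h : lo < hi) : lo ≤ (lo + hi) / 2 := by
  refine (Nat.le_div_iff_mul_le (Nat.succ_pos 1)).mpr ?_
  rw [Nat.mul_two]
  exact Nat.add_le_add_left (Nat.le_of_lt h) lo

theorem pvT_mid_lt (lo hi : Nat) (h : lo < hi) : (lo + hi) / 2 < hi := by
  refine (Nat.div_lt_iff_lt_mul (Nat.succ_pos 1)).mpr ?_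
  rw [Nat.mul_two]
  exact Nat.add_lt_add_right h hi

theorem pvT_bs_left (lo hi : Nat) (h : lo < hi) : hi - ((lo + hi) / 2 + 1) < hi - lo :=
  Nat.sub_lt_sub_left h (Nat.lt_succ_of_le (pvT_mid_ge lo hi h))

theorem pvT_bs_right (lo hi : Nat) (h : lo < hi) : (lo + hi) / 2 - lo < hi - lo :=
  Nat.sub_lt_sub_right (pvT_mid_ge lo hi h) (pvT_mid_lt lo hi h)

-- ===== PORT A =====
-- inner 'for j in range(i, len(a))' loop with its break; s, maxsum as in A
def innerA (a : List Int) (maximum : Int) (j : Nat) (s maxsum : Int) : Int :=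
  if h : j < a.length then
    if s + a[j] ≤ maximum then
      innerA a maximum (j + 1) (s + a[j])
        (if s + a[j] > maxsum then s + a[j] else maxsum)
    else maxsum
  else maxsum
termination_by a.length - j

-- outer 'for i in range(0, len(a))' loop
def outerA (a : List Int) (maximum : Int) (i : Nat) (maxsum : Int) : Int :=
  if h : i < a.length then outerA a maximum (i + 1) (innerA a maximum i 0 maxsum) else maxsum
termination_by a.length - i
decreasing_by exact Nat.sub_succ_lt_self a.length i h

def maxDistanse (a : List Int) (maximum : Int) : Int := outerA a maximum 0 0

-- ===== PORT B =====
-- 'while st and st[-1] <= v: st.pop()'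
def popB (st : List Int) (v : Int) : List Int :=
  if h : st ≠ [] then
    if st.getLast h ≤ v then popB st.dropLast v else st
  else st
termination_by st.length
decreasing_by exact pvT_dropLast_lt st h

-- the 'while lo < hi' binary search
def bsB (st : List Int) (thr : Int) (lo hi : Nat) : Nat :=
  if h : lo < hi then
    if st.getD ((lo + hi) / 2) 0 > thr then bsB st thr ((lo + hi) / 2 + 1) hi
    else bsB st thr lo ((lo + hi) / 2)
  else lo
termination_by hi - lo
decreasing_by
  · exact pvT_bs_left lo hi h
  · exact pvT_bs_right lo hi h

-- 'for i in range(n - 1, -1, -1)' with state (st, best, pi1)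
def loopB (a : List Int) (maximum : Int) (i : Nat) (st : List Int) (best pi1 : Int) : Int :=
  let st1 := popB st pi1 ++ [pi1]
  let pi := pi1 - a.getD i 0
  let thr := pi + maximum
  let lo := bsB st1 thr 0 st1.length
  let best1 := if lo < st1.length ∧ st1.getD lo 0 - pi > best then st1.getD lo 0 - pi else best
  if h : i = 0 then best1 else loopB a maximum (i - 1) st1 best1 pi
termination_by i
decreasing_by exact Nat.sub_lt (Nat.pos_of_ne_zero h) Nat.one_pos

def maxDistanse_alt (a : List Int) (maximum : Int) : Int :=
  if a.length = 0 then 0 else loopB a maximum (a.length - 1) [] 0 a.sum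

-- ===== PRECONDITION & SPEC =====
def Spec_maxDistanse (a : List Int) (maximum : Int) (out : Int) : Prop := out = maxDistanse_alt a maximum
instance (a : List Int) (maximum : Int) (out : Int) : Decidable (Spec_maxDistanse a maximum out) := by unfold Spec_maxDistanse; infer_instance

-- ===== CLAIM (what is proved, stated in full; the proofs are below) =====
def Claim_equal_maxDistanse : Prop := ∀ (a : List Int) (maximum : Int), Dom_maxDistanse a maximum → Spec_maxDistanse a maximum (maxDistanse a maximum)

-- ===== LEMMAS AND PROOFS =====

-- prefix sums P(k) = sum of the first k elements
def pref (a : List Int) (k : Nat) : Int := (a.take k).sum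

-- the list of partial sums of A's capped greedy run starting at j with accumulator s
def runA (a : List Int) (maximum : Int) (j : Nat) (s : Int) : List Int :=
  if h : j < a.length then
    if s + a[j] ≤ maximum then (s + a[j]) :: runA a maximum (j + 1) (s + a[j]) else []
  else []
termination_by a.length - j
decreasing_by exact Nat.sub_succ_lt_self a.length j h

-- the same run in absolute prefix-sum form: P(j+1), P(j+2), … while ≤ thr
def runP (a : List Int) (thr : Int) (j : Nat) : List Int :=
  if h : j < a.length then
    if pref a (j + 1) ≤ thr then pref a (j + 1) :: runP a thr (j + 1) else []
  else []
termination_by a.length - j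
decreasing_by exact Nat.sub_succ_lt_self a.length j h

-- model of B's stack after processing index i (suffix running maxima of P over (i, n])
def Smod (a : List Int) (i : Nat) : List Int :=
  if h : i < a.length then popB (Smod a (i + 1)) (pref a (i + 1)) ++ [pref a (i + 1)] else []
termination_by a.length - i
decreasing_by exact Nat.sub_succ_lt_self a.length i h

def omaxO (x : Int) : Option Int → Int
  | none => x
  | some w => max x w

def maxR : List Int → Option Int
  | [] => none
  | x :: xs => some (omaxO x (maxR xs))

def omax (b : Int) : Option Int → Int
  | none => b
  | some w => max b w

-- per-start contribution: the best capped-run value from i, shifted by P(i)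
def gC (a : List Int) (maximum : Int) (i : Nat) : Option Int :=
  (maxR (runP a (pref a i + maximum) i)).map (· - pref a i)

def stepC (a : List Int) (maximum : Int) (b : Int) (i : Nat) : Int :=
  omax b (gC a maximum i)

theorem pref_succ (a : List Int) (j : Nat) (h : j < a.length) :
    pref a (j + 1) = pref a j + a[j] := by
  unfold pref
  rw [List.take_add_one, List.sum_append]
  simp [List.getElem?_eq_getElem h]

theorem innerA_eq_foldl (a : List Int) (m : Int) :
    ∀ j s best, innerA a m j s best = (runA a m j s).foldl max best := by
  intro j s best
  induction hj : a.length - j generalizing j s best with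
  | zero =>
    rw [innerA, runA]
    have : ¬ j < a.length := by omega
    simp [this]
  | succ n ih =>
    rw [innerA, runA]
    by_cases h : j < a.length
    · simp only [h, dif_pos]
      by_cases hc : s + a[j] ≤ m
      · simp only [hc, if_pos]
        rw [ih (j+1) _ _ (by omega), List.foldl_cons]
        congr 1
        rcases le_or_gt (s + a[j]) best with hb | hb
        · simp [max_eq_left hb, if_neg (not_lt.mpr hb)]
        · simp [max_eq_right hb.le, if_pos hb]
      · simp [hc]
    · simp [h]

theorem runA_eq_map (a : List Int) (m : Int) :
    ∀ j p, runA a m j (pref a j - p) = (runP a (p + m) j).map (· - p) := by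
  intro j p
  induction hj : a.length - j generalizing j with
  | zero =>
    rw [runA, runP]
    have : ¬ j < a.length := by omega
    simp [this]
  | succ n ih =>
    rw [runA, runP]
    by_cases h : j < a.length
    · simp only [h, dif_pos]
      have hps : pref a j - p + a[j] = pref a (j+1) - p := by
        rw [pref_succ a j h]; ring
      rw [hps]
      by_cases hc : pref a (j+1) ≤ p + m
      · have hc' : pref a (j+1) - p ≤ m := by omega
        rw [if_pos hc', if_pos hc, List.map_cons, ih (j+1) (by omega)]
      · have hc' : ¬ pref a (j+1) - p ≤ m := by omega
        rw [if_neg hc', if_neg hc, List.map_nil]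
    · simp [h]

theorem foldl_max_eq_omax : ∀ (l : List Int) (b : Int), l.foldl max b = omax b (maxR l) := by
  intro l
  induction l with
  | nil => intro b; simp [maxR, omax]
  | cons x xs ih =>
    intro b
    rw [List.foldl_cons, ih]
    simp only [maxR, omax]
    cases hx : maxR xs with
    | none => simp [omaxO]
    | some w => simp [omaxO, max_assoc]

theorem maxR_map_sub (p : Int) : ∀ (l : List Int), maxR (l.map (· - p)) = (maxR l).map (· - p) := by
  intro l
  induction l with
  | nil => simp [maxR]
  | cons x xs ih =>
    simp only [List.map_cons, maxR, ih]
    cases hx : maxR xs with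
    | none => simp [omaxO]
    | some w => simp [omaxO, max_sub_sub_right]

theorem innerA_eq_step (a : List Int) (m : Int) (i : Nat) (best : Int) :
    innerA a m i 0 best = stepC a m best i := by
  have h0 : (0:Int) = pref a i - pref a i := by ring
  rw [innerA_eq_foldl, h0, runA_eq_map, foldl_max_eq_omax, maxR_map_sub]
  rfl

-- takeWhile ignores a last element that fails the predicate
theorem takeWhile_dropLast (p : Int → Bool) :
    ∀ (l : List Int) (h : l ≠ []), p (l.getLast h) = false → l.takeWhile p = l.dropLast.takeWhile p := by
  intro l
  induction l with
  | nil => simp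
  | cons x t ih =>
    intro h hp
    cases t with
    | nil =>
      simp only [List.getLast_singleton] at hp
      simp [List.takeWhile, hp]
    | cons y s =>
      have hne : (y :: s : List Int) ≠ [] := by simp
      have hlast : (x :: y :: s).getLast h = (y :: s).getLast hne := by
        simp [List.getLast_cons]
      rw [hlast] at hp
      have hd : (x :: y :: s).dropLast = x :: (y :: s).dropLast := by simp
      rw [hd]
      cases hpx : p x
      · simp [hpx]
      · simp [hpx, ih hne hp]

theorem pairwise_ge_getLast :
    ∀ (l : List Int) (h : l ≠ []), l.Pairwise (· > ·) → ∀ y ∈ l, l.getLast h ≤ y := by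
  intro l
  induction l with
  | nil => intro h; exact absurd rfl h
  | cons x t ih =>
    intro h hp y hy
    cases t with
    | nil =>
      simp at hy
      simp [hy]
    | cons z s =>
      have hne : (z :: s : List Int) ≠ [] := by simp
      have hlast : (x :: z :: s).getLast h = (z :: s).getLast hne := by
        simp [List.getLast_cons]
      rw [hlast]
      rcases List.mem_cons.mp hy with rfl | hy'
      · have : (z :: s).getLast hne ∈ z :: s := List.getLast_mem hne
        exact le_of_lt ((List.pairwise_cons.mp hp).1 _ this)
      · exact ih hne (List.pairwise_cons.mp hp).2 y hy' 

theorem popB_eq_takeWhile (v : Int) :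
    ∀ (st : List Int), st.Pairwise (· > ·) → popB st v = st.takeWhile (· > v) := by
  intro st
  induction hn : st.length generalizing st with
  | zero =>
    intro _
    have : st = [] := List.eq_nil_of_length_eq_zero hn
    subst this
    rw [popB]; simp
  | succ n ih =>
    intro hp
    have hne : st ≠ [] := by intro h; subst h; simp at hn
    rw [popB, dif_pos hne]
    by_cases hlast : st.getLast hne ≤ v
    · rw [if_pos hlast]
      have hpd : st.dropLast.Pairwise (· > ·) := hp.sublist (List.dropLast_sublist st)
      have hld : st.dropLast.length = n := by
        rw [List.length_dropLast, hn]; omega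
      rw [ih st.dropLast hld hpd]
      have : ((· > v) (st.getLast hne) : Bool) = false := by
        simp [decide_eq_false_iff_not]
        omega
      exact (takeWhile_dropLast (· > v) st hne this).symm
    · rw [if_neg hlast]
      have hall : ∀ y ∈ st, (fun x => decide (x > v)) y = true := by
        intro y hy
        have hge := pairwise_ge_getLast st hne hp y hy
        exact decide_eq_true (by omega)
      exact (List.takeWhile_eq_self_iff.mpr hall).symm

theorem Smod_pairwise (a : List Int) : ∀ i, (Smod a i).Pairwise (· > ·) := by
  intro i
  induction hj : a.length - i generalizing i with
  | zero =>
    rw [Smod]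
    have : ¬ i < a.length := by omega
    simp [this]
  | succ n ih =>
    rw [Smod]
    by_cases h : i < a.length
    · rw [dif_pos h, popB_eq_takeWhile _ _ (ih (i+1) (by omega))]
      rw [List.pairwise_append]
      refine ⟨(ih (i+1) (by omega)).sublist (List.takeWhile_sublist _), by simp, ?_⟩
      intro x hx y hy
      simp only [List.mem_singleton] at hy
      subst hy
      have := List.mem_takeWhile_imp (p := fun x => decide (x > pref a (i + 1))) hx
      exact of_decide_eq_true this
    · simp [h]


theorem dropWhile_append_all (p : Int → Bool) :
    ∀ (l1 l2 : List Int), (∀ x ∈ l1, p x = true) → List.dropWhile p (l1 ++ l2) = List.dropWhile p l2 := by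
  intro l1
  induction l1 with
  | nil => simp
  | cons x t ih =>
    intro l2 h
    rw [List.cons_append, List.dropWhile_cons_of_pos (h x (by simp))]
    exact ih l2 (fun y hy => h y (by simp [hy]))

theorem takeWhile_append_all (p : Int → Bool) :
    ∀ (l1 l2 : List Int), (∀ x ∈ l1, p x = true) → List.takeWhile p (l1 ++ l2) = l1 ++ List.takeWhile p l2 := by
  intro l1
  induction l1 with
  | nil => simp
  | cons x t ih =>
    intro l2 h
    rw [List.cons_append, List.takeWhile_cons_of_pos (h x (by simp)), ih l2 (fun y hy => h y (by simp [hy])),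
      List.cons_append]

theorem dropWhile_head_false (p : Int → Bool) :
    ∀ (l : List Int) (x : Int) (r : List Int), List.dropWhile p l = x :: r → p x = false := by
  intro l
  induction l with
  | nil => intro x r h; simp at h
  | cons y t ih =>
    intro x r h
    by_cases hy : p y
    · rw [List.dropWhile_cons_of_pos hy] at h; exact ih x r h
    · rw [List.dropWhile_cons_of_neg hy] at h
      injection h with h1 _
      subst h1
      simpa using hy

-- pushing v onto the stack: queries above v's cap still see nothing
theorem push_none (st : List Int) (v thr : Int) (hv : ¬ v ≤ thr) :
    ((st.takeWhile (fun x => decide (x > v)) ++ [v]).dropWhile (fun x => decide (x > thr))).head? = none := by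
  have hall : ∀ x ∈ st.takeWhile (fun x => decide (x > v)) ++ [v], (fun x => decide (x > thr)) x = true := by
    intro x hx
    rcases List.mem_append.mp hx with hx | hx
    · have := of_decide_eq_true (List.mem_takeWhile_imp (p := fun x => decide (x > v)) hx)
      exact decide_eq_true (by omega)
    · simp only [List.mem_singleton] at hx
      subst hx
      exact decide_eq_true (by omega)
  rw [List.dropWhile_eq_nil_iff.mpr hall]
  rfl

-- pushing v onto the stack: the query result gains v as a candidate
theorem push_sel (st : List Int) (v thr : Int) (M : Option Int) (hv : v ≤ thr)
    (hM : (st.dropWhile (fun x => decide (x > thr))).head? = M) :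
    ((st.takeWhile (fun x => decide (x > v)) ++ [v]).dropWhile (fun x => decide (x > thr))).head?
      = some (omaxO v M) := by
  cases hdw : st.dropWhile (fun x => decide (x > thr)) with
  | nil =>
    rw [hdw] at hM
    have hall : ∀ x ∈ st, x > thr := fun x hx =>
      of_decide_eq_true (List.dropWhile_eq_nil_iff.mp hdw x hx)
    have htweq : st.takeWhile (fun x => decide (x > v)) = st :=
      List.takeWhile_eq_self_iff.mpr (fun x hx => decide_eq_true (by have := hall x hx; omega))
    rw [htweq, dropWhile_append_all _ st [v] (fun x hx => decide_eq_true (hall x hx)),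
      List.dropWhile_cons_of_neg (by simp; omega)]
    simp only [List.head?_cons, ← hM]
    rfl
  | cons w rest =>
    rw [hdw] at hM
    simp only [List.head?_cons] at hM
    have hsteq : st.takeWhile (fun x => decide (x > thr)) ++ (w :: rest) = st := by
      rw [← hdw]; exact List.takeWhile_append_dropWhile
    have hAall : ∀ x ∈ st.takeWhile (fun x => decide (x > thr)), x > thr := fun x hx =>
      of_decide_eq_true (List.mem_takeWhile_imp (p := fun x => decide (x > thr)) hx)
    have hwle : w ≤ thr := by
      have := dropWhile_head_false _ st w rest hdw
      simp only [decide_eq_false_iff_not, not_lt] at this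
      exact this
    by_cases hwv : w > v
    · have h1 : st.takeWhile (fun x => decide (x > v)) =
          st.takeWhile (fun x => decide (x > thr)) ++ w :: (rest.takeWhile (fun x => decide (x > v))) := by
        conv_lhs => rw [← hsteq]
        rw [takeWhile_append_all _ _ _ (fun x hx => decide_eq_true (by have := hAall x hx; omega)),
          List.takeWhile_cons_of_pos (p := fun x => decide (x > v)) (decide_eq_true hwv)]
      rw [h1, List.append_assoc, List.cons_append,
        dropWhile_append_all _ _ _ (fun x hx => decide_eq_true (by have := hAall x hx; omega)),
        List.dropWhile_cons_of_neg (by simp; omega)]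
      simp only [List.head?_cons, ← hM, omaxO]
      rw [max_eq_right (le_of_lt hwv)]
    · have h1 : st.takeWhile (fun x => decide (x > v)) = st.takeWhile (fun x => decide (x > thr)) := by
        conv_lhs => rw [← hsteq]
        rw [takeWhile_append_all _ _ _ (fun x hx => decide_eq_true (by have := hAall x hx; omega)),
          List.takeWhile_cons_of_neg (p := fun x => decide (x > v)) (by simpa using hwv), List.append_nil]
      rw [h1, dropWhile_append_all _ _ _ (fun x hx => decide_eq_true (hAall x hx)),
        List.dropWhile_cons_of_neg (by simp; omega)]
      simp only [List.head?_cons, ← hM, omaxO]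
      rw [max_eq_left (by omega)]

-- the crux: querying the stack = max of the capped run
theorem sel_eq_maxR_runP (a : List Int) :
    ∀ i thr, ((Smod a i).dropWhile (· > thr)).head? = maxR (runP a thr i) := by
  intro i thr
  induction hj : a.length - i generalizing i thr with
  | zero =>
    rw [Smod, runP]
    have : ¬ i < a.length := by omega
    simp [this, maxR]
  | succ n ih =>
    by_cases h : i < a.length
    · rw [Smod, runP, dif_pos h, dif_pos h,
        popB_eq_takeWhile (pref a (i+1)) (Smod a (i+1)) (Smod_pairwise a (i+1))]
      by_cases hvthr : pref a (i+1) ≤ thr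
      · rw [if_pos hvthr, maxR,
          push_sel (Smod a (i+1)) (pref a (i+1)) thr (maxR (runP a thr (i+1))) hvthr
            (ih (i+1) thr (by omega))]
      · rw [if_neg hvthr, push_none (Smod a (i+1)) (pref a (i+1)) thr hvthr]
        rfl
    · rw [Smod, runP]
      simp [h, maxR]

theorem bsB_eq (st : List Int) (thr : Int) (hp : st.Pairwise (· > ·)) :
    ∀ lo hi, lo ≤ (st.takeWhile (· > thr)).length → (st.takeWhile (· > thr)).length ≤ hi →
      hi ≤ st.length → bsB st thr lo hi = (st.takeWhile (· > thr)).length := by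
  have hlen := (List.takeWhile_prefix (l := st) (fun x => decide (x > thr))).length_le
  have hF1 : ∀ k, k < (st.takeWhile (fun x => decide (x > thr))).length →
      ∀ (hk : k < st.length), st[k] > thr := by
    intro k hk hk2
    have hg := (List.takeWhile_prefix (l := st) (fun x => decide (x > thr))).getElem hk
    have hm : (st.takeWhile (fun x => decide (x > thr)))[k] ∈
        st.takeWhile (fun x => decide (x > thr)) := List.getElem_mem hk
    have := of_decide_eq_true (List.mem_takeWhile_imp (p := fun x => decide (x > thr)) hm)
    rw [hg] at this
    exact this
  have hF2 : ∀ k, (st.takeWhile (fun x => decide (x > thr))).length ≤ k →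
      ∀ (hk : k < st.length), ¬ st[k] > thr := by
    intro k hkt hk
    have ht : (st.takeWhile (fun x => decide (x > thr))).length < st.length := by omega
    -- st[t] fails the predicate
    have hsplit : st.takeWhile (fun x => decide (x > thr)) ++ st.dropWhile (fun x => decide (x > thr)) = st :=
      List.takeWhile_append_dropWhile
    have hdlen : (st.dropWhile (fun x => decide (x > thr))).length ≠ 0 := by
      have := congrArg List.length hsplit
      simp only [List.length_append] at this
      omega
    cases hdw : st.dropWhile (fun x => decide (x > thr)) with
    | nil => rw [hdw] at hdlen; simp at hdlen
    | cons w rest =>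
      have hwfalse := dropWhile_head_false _ st w rest hdw
      have hwle : ¬ w > thr := by
        simpa using hwfalse
      obtain ⟨t, htEq⟩ : ∃ t, t = (st.takeWhile (fun x => decide (x > thr))).length := ⟨_, rfl⟩
      have hstt' : st[t]? = some w := by
        conv_lhs => rw [← hsplit]
        rw [List.getElem?_append_right (by omega), hdw]
        have h0 : t - (st.takeWhile (fun x => decide (x > thr))).length = 0 := by omega
        rw [h0]
        rfl
      rw [htEq] at hstt'
      rcases Nat.eq_or_lt_of_le hkt with heq | hlt
      · intro hgt
        have h2 := List.getElem?_eq_getElem hk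
        rw [heq] at hstt'
        rw [hstt'] at h2
        injection h2 with h2
        omega
      · have hstt : st[(st.takeWhile (fun x => decide (x > thr))).length]'ht = w := by
          have h2 := List.getElem?_eq_getElem ht
          rw [hstt'] at h2
          injection h2 with h2
          exact h2.symm
        have := List.pairwise_iff_getElem.mp hp _ k ht hk hlt
        rw [hstt] at this
        omega
  suffices hgen : ∀ n lo hi, hi - lo ≤ n → lo ≤ (st.takeWhile (fun x => decide (x > thr))).length →
      (st.takeWhile (fun x => decide (x > thr))).length ≤ hi → hi ≤ st.length →
      bsB st thr lo hi = (st.takeWhile (fun x => decide (x > thr))).length by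
    intro lo hi h1 h2 h3
    exact hgen (hi - lo) lo hi (le_refl _) h1 h2 h3
  intro n
  induction n with
  | zero =>
    intro lo hi hle h1 h2 h3
    rw [bsB]
    have : ¬ lo < hi := by omega
    rw [dif_neg this]
    omega
  | succ n ih =>
    intro lo hi hle h1 h2 h3
    rw [bsB]
    by_cases hlh : lo < hi
    · rw [dif_pos hlh]
      have hmidlt : (lo + hi) / 2 < st.length := by omega
      rw [List.getD_eq_getElem _ _ hmidlt]
      by_cases hc : st[(lo + hi) / 2] > thr
      · rw [if_pos (by exact hc)]
        have : (lo + hi) / 2 < (st.takeWhile (fun x => decide (x > thr))).length := by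
          by_contra hcon
          exact hF2 _ (by omega) hmidlt hc
        exact ih _ hi (by omega) (by omega) h2 h3
      · rw [if_neg (by exact hc)]
        have : (st.takeWhile (fun x => decide (x > thr))).length ≤ (lo + hi) / 2 := by
          by_contra hcon
          exact hc (hF1 _ (by omega) hmidlt)
        exact ih lo _ (by omega) h1 (by omega) (by omega)
    · rw [dif_neg hlh]
      omega

theorem step_comm (a : List Int) (m : Int) (b : Int) (i j : Nat) :
    stepC a m (stepC a m b i) j = stepC a m (stepC a m b j) i := by
  simp only [stepC]
  cases gC a m i with
  | none =>
    cases gC a m j with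
    | none => rfl
    | some y => rfl
  | some x =>
    cases gC a m j with
    | none => rfl
    | some y =>
      simp only [omax]
      rw [max_assoc, max_comm x y, ← max_assoc]

theorem foldl_step_reverse (a : List Int) (m : Int) :
    ∀ (l : List Nat) (b : Int), l.reverse.foldl (stepC a m) b = l.foldl (stepC a m) b := by
  have haux : ∀ (l : List Nat) (b : Int) (x : Nat),
      l.foldl (stepC a m) (stepC a m b x) = stepC a m (l.foldl (stepC a m) b) x := by
    intro l
    induction l with
    | nil => intro b x; rfl
    | cons y t ih =>
      intro b x
      simp only [List.foldl_cons]
      rw [step_comm, ih]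
  intro l
  induction l with
  | nil => intro b; rfl
  | cons x t ih =>
    intro b
    simp only [List.reverse_cons, List.foldl_append, List.foldl_cons, List.foldl_nil, ih, haux]

theorem outerA_eq_foldl (a : List Int) (m : Int) :
    ∀ i b, outerA a m i b = (List.range' i (a.length - i)).foldl (stepC a m) b := by
  intro i
  induction hj : a.length - i generalizing i with
  | zero =>
    intro b
    rw [outerA]
    have h : ¬ i < a.length := by omega
    rw [dif_neg h]
    rfl
  | succ n ih =>
    intro b
    rw [outerA]
    by_cases h : i < a.length
    · rw [dif_pos h, List.range'_succ, List.foldl_cons]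
      rw [ih (i+1) (by omega), innerA_eq_step]
    · omega


-- B's per-iteration update, expressed through the stack query
theorem query_eq (stt : List Int) (thr pi b : Int) (hp : stt.Pairwise (· > ·)) :
    (if bsB stt thr 0 stt.length < stt.length ∧ stt.getD (bsB stt thr 0 stt.length) 0 - pi > b
      then stt.getD (bsB stt thr 0 stt.length) 0 - pi else b)
    = omax b (((stt.dropWhile (fun x => decide (x > thr))).head?).map (· - pi)) := by
  have hsplit : stt.takeWhile (fun x => decide (x > thr)) ++ stt.dropWhile (fun x => decide (x > thr)) = stt :=
    List.takeWhile_append_dropWhile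
  have hlensum : (stt.takeWhile (fun x => decide (x > thr))).length
      + (stt.dropWhile (fun x => decide (x > thr))).length = stt.length := by
    have h := congrArg List.length hsplit
    rw [List.length_append] at h
    exact h
  have hbs : bsB stt thr 0 stt.length = (stt.takeWhile (fun x => decide (x > thr))).length :=
    bsB_eq stt thr hp 0 stt.length (by omega) (by omega) (le_refl _)
  rw [hbs]
  cases hdw : stt.dropWhile (fun x => decide (x > thr)) with
  | nil =>
    rw [hdw] at hlensum
    simp only [List.length_nil] at hlensum
    have hnl : ¬ (stt.takeWhile (fun x => decide (x > thr))).length < stt.length := by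
      omega
    rw [if_neg (by intro hcon; exact hnl hcon.1)]
    rfl
  | cons w rest =>
    have htlt : (stt.takeWhile (fun x => decide (x > thr))).length < stt.length := by
      rw [hdw] at hlensum
      simp only [List.length_cons] at hlensum
      omega
    have hgd : stt.getD (stt.takeWhile (fun x => decide (x > thr))).length 0 = w := by
      rw [List.getD_eq_getElem _ _ htlt]
      obtain ⟨t, htEq⟩ : ∃ t, t = (stt.takeWhile (fun x => decide (x > thr))).length := ⟨_, rfl⟩
      have hstt' : stt[t]? = some w := by
        conv_lhs => rw [← hsplit]
        rw [List.getElem?_append_right (by omega), hdw]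
        have h0 : t - (stt.takeWhile (fun x => decide (x > thr))).length = 0 := by omega
        rw [h0]
        rfl
      rw [htEq] at hstt'
      have h2 := List.getElem?_eq_getElem htlt
      rw [hstt'] at h2
      injection h2 with h2
      exact h2.symm
    rw [hgd]
    simp only [List.head?_cons, Option.map_some, omax]
    by_cases hb : w - pi > b
    · rw [if_pos ⟨htlt, hb⟩, max_eq_right (by omega)]
    · rw [if_neg (by intro hcon; exact hb hcon.2), max_eq_left (by omega)]

theorem loopB_eq_foldl (a : List Int) (m : Int) :
    ∀ i, i < a.length → ∀ b, loopB a m i (Smod a (i + 1)) b (pref a (i + 1)) =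
      ((List.range' 0 (i + 1)).reverse).foldl (stepC a m) b := by
  have hstep : ∀ i, i < a.length → ∀ b : Int,
      (if bsB (Smod a i) (pref a i + m) 0 (Smod a i).length < (Smod a i).length ∧
          (Smod a i).getD (bsB (Smod a i) (pref a i + m) 0 (Smod a i).length) 0 - pref a i > b
        then (Smod a i).getD (bsB (Smod a i) (pref a i + m) 0 (Smod a i).length) 0 - pref a i
        else b) = stepC a m b i := by
    intro i hi b
    rw [query_eq (Smod a i) (pref a i + m) (pref a i) b (Smod_pairwise a i),
      sel_eq_maxR_runP a i (pref a i + m)]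
    rfl
  intro i
  induction i with
  | zero =>
    intro h b
    have hsm : popB (Smod a 1) (pref a 1) ++ [pref a 1] = Smod a 0 := by
      conv_rhs => rw [Smod]
      rw [dif_pos h]
    rw [loopB]
    simp only []
    rw [hsm]
    have hpi : pref a 1 - a.getD 0 0 = pref a 0 := by
      rw [List.getD_eq_getElem _ _ h, pref_succ a 0 h]; ring
    rw [hpi, dif_pos trivial, hstep 0 h b]
    rfl
  | succ j ih =>
    intro h b
    have hsm : popB (Smod a (j+1+1)) (pref a (j+1+1)) ++ [pref a (j+1+1)] = Smod a (j+1) := by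
      conv_rhs => rw [Smod]
      rw [dif_pos h]
    rw [loopB]
    rw [hsm]
    have hpi : pref a (j+1+1) - a.getD (j+1) 0 = pref a (j+1) := by
      rw [List.getD_eq_getElem _ _ h, pref_succ a (j+1) h]; ring
    rw [hpi, dif_neg (Nat.succ_ne_zero j), hstep (j+1) h b]
    have hj1 : j + 1 - 1 = j := rfl
    rw [hj1, ih (by omega) (stepC a m b (j+1))]
    have hr : List.range' 0 (j+1+1) = List.range' 0 (j+1) ++ [j+1] := by
      have := List.range'_concat (step := 1) (s := 0) (n := j+1)
      simpa using this
    rw [hr, List.reverse_append]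
    rfl

-- ===== VERDICT (by name: the statement is the Claim_ definition above) =====
theorem maxDistanse_spec : Claim_equal_maxDistanse := by
  intro a m _
  unfold Spec_maxDistanse maxDistanse maxDistanse_alt
  by_cases h : a.length = 0
  · rw [if_pos h, outerA]
    have hn : ¬ 0 < a.length := by omega
    rw [dif_neg hn]
  · rw [if_neg h]
    have hlen := loopB_eq_foldl a m (a.length - 1) (by omega) 0
    rw [show a.length - 1 + 1 = a.length from by omega] at hlen
    rw [Smod, dif_neg (lt_irrefl _)] at hlen
    have hps : pref a a.length = a.sum := by
      unfold pref
      rw [List.take_length]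
    rw [hps] at hlen
    rw [hlen, foldl_step_reverse, outerA_eq_foldl, Nat.sub_zero]
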